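-- pv_equiv track=rewrite | github.com/mrprashantkumar/LeetCode-Submissions-Python | Remove the balls - GFG/remove-the-balls.py | finLength
-- ===== SOURCE A (Python) =====
-- from typing import List
--
-- def finLength(N : int, color : List[int], radius : List[int]) -> int:
--     seen = []
--     i = 0
--     n = len(color)
--     while i<n:
--         if seen and seen[-1] == (color[i], radius[i]):
--             seen.pop()
--         else:
--             seen.append((color[i], radius[i]))
--         i += 1
--
--     return len(seen)
-- ===== SOURCE B (Python) =====
-- def finLength(N, color, radius):
--     # Fixpoint cancellation: repeatedly delete the FIRST adjacent equal
--     # (color, radius) pair until a full scan finds none; return the length.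
--     L = list(zip(color, radius))
--     changed = True
--     while changed:
--         changed = False
--         for j in range(len(L) - 1):
--             if L[j] == L[j + 1]:
--                 del L[j:j + 2]
--                 changed = True
--                 break
--     return len(L)
-- ===== Notes on version B (the rewrite author's own statement) =====
-- stated objective: alternative
-- what changed: Replaces A's one-pass stack (push, pop on match with top) by a repeated-scan fixpoint: zip color/radius into pairs, repeatedly delete the first adjacent equal pair until none remains, return the remaining length; equal by confluence of adjacent-pair cancellation.
import Mathlib
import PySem

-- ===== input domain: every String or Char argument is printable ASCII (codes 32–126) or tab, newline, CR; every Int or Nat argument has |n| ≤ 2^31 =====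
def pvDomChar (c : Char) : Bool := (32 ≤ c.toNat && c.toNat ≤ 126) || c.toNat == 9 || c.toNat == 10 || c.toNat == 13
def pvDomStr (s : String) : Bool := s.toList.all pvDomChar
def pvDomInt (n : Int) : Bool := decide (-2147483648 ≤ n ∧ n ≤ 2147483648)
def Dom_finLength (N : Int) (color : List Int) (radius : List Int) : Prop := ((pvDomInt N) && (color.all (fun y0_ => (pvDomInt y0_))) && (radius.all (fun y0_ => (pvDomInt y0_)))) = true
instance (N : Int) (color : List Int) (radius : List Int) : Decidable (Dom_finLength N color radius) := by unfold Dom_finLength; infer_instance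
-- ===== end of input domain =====

-- A pushes/pops (color[i], radius[i]) on a stack; B reduces the zipped pair list to the
-- fixpoint of first-adjacent-equal-pair deletion; they agree because cancellation is confluent.

-- ===== PORT A =====
-- one iteration of A's while-loop body: seen[-1] is pyGet? seen (-1), pop() drops the last
-- element, append adds at the end; radius[i] out of range (excluded by Pre_) falls to the
-- no-op branch, matching Python's raise only outside Pre_.
def pvStepA (color radius : List Int) (seen : List (Int × Int)) (i : Int) : List (Int × Int) :=
  match PySem.List.pyGet? color i, PySem.List.pyGet? radius i with
  | some c, some r =>
      if seen ≠ [] ∧ PySem.List.pyGet? seen (-1) = some (c, r) then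
        seen.dropLast
      else
        seen ++ [(c, r)]
  | _, _ => seen

def finLength (N : Int) (color : List Int) (radius : List Int) : Int :=
  let n : Int := color.length
  (((PySem.List.pyRange 0 n 1).foldl (pvStepA color radius) []).length : Int)

-- ===== PORT B =====
-- one full scan of B's inner for-loop: remove the first adjacent equal pair (none = no pair)
def pvCancelOnce : List (Int × Int) → Option (List (Int × Int))
  | a :: b :: t => if a = b then some t else (pvCancelOnce (b :: t)).map (a :: ·)
  | _ => none

theorem pvCancelOnce_length : ∀ {L L' : List (Int × Int)}, pvCancelOnce L = some L' →
    L'.length < L.length := by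
  intro L
  induction L with
  | nil => intro L' h; simp [pvCancelOnce] at h
  | cons a t ih =>
    intro L' h
    cases t with
    | nil => simp [pvCancelOnce] at h
    | cons b t' =>
      by_cases hab : a = b
      · rw [pvCancelOnce, if_pos hab] at h
        cases h; simp only [List.length_cons]; omega
      · rw [pvCancelOnce, if_neg hab] at h
        cases hM : pvCancelOnce (b :: t') with
        | none => rw [hM] at h; exact absurd h (by simp)
        | some M =>
          rw [hM] at h
          simp at h
          subst h
          have := ih hM
          simp at this ⊢
          omega

-- B's outer while-loop: repeat until no adjacent equal pair remains
def pvReduce (L : List (Int × Int)) : List (Int × Int) :=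
  match h : pvCancelOnce L with
  | some L' => pvReduce L'
  | none => L
termination_by L.length
decreasing_by exact pvCancelOnce_length h

def finLength_alt (N : Int) (color : List Int) (radius : List Int) : Int :=
  ((pvReduce (color.zip radius)).length : Int)

-- ===== PRECONDITION & SPEC =====
-- Pre_ excludes exactly the inputs where A raises IndexError: color longer than radius.
def Pre_finLength (N : Int) (color : List Int) (radius : List Int) : Prop :=
  color.length ≤ radius.length
instance (N : Int) (color : List Int) (radius : List Int) : Decidable (Pre_finLength N color radius) := by unfold Pre_finLength; infer_instance

def pvWitness_finLength : Int × List Int × List Int := (3, [1, 1, 2], [2, 2, 3])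

def Spec_finLength (N : Int) (color : List Int) (radius : List Int) (out : Int) : Prop := out = finLength_alt N color radius
instance (N : Int) (color : List Int) (radius : List Int) (out : Int) : Decidable (Spec_finLength N color radius out) := by unfold Spec_finLength; infer_instance

-- ===== CLAIM (what is proved, stated in full; the proofs are below) =====
def Claim_equal_finLength : Prop := ∀ (N : Int) (color : List Int) (radius : List Int), Dom_finLength N color radius → Pre_finLength N color radius → Spec_finLength N color radius (finLength N color radius)


-- ===== LEMMAS AND PROOFS =====

-- the cons-form of A's stack step (A's end-append stack is its reverse)
def pvStep (s : List (Int × Int)) (p : Int × Int) : List (Int × Int) :=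
  if s.head? = some p then s.tail else p :: s

theorem pvStep_chain {s : List (Int × Int)} (h : s.IsChain (· ≠ ·)) (p : Int × Int) :
    (pvStep s p).IsChain (· ≠ ·) := by
  unfold pvStep
  split
  · cases s with
    | nil => simp
    | cons a t => exact (List.isChain_cons.mp h).2
  · rename_i hne
    cases s with
    | nil => simp
    | cons a t =>
      refine List.isChain_cons.mpr ⟨?_, h⟩
      intro y hy
      simp at hy
      subst hy
      intro he
      exact hne (by simp [he])

theorem pvStep_step {s : List (Int × Int)} (h : s.IsChain (· ≠ ·)) (p : Int × Int) :
    pvStep (pvStep s p) p = s := by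
  cases s with
  | nil => simp [pvStep]
  | cons a t =>
    by_cases hap : a = p
    · subst hap
      have hne : ∀ y ∈ t.head?, a ≠ y := (List.isChain_cons.mp h).1
      have h1 : pvStep (a :: t) a = t := by simp [pvStep]
      rw [h1]
      unfold pvStep
      cases ht : t.head? with
      | none =>
        cases t with
        | nil => simp
        | cons c t'' => simp at ht
      | some b =>
        have hba : b ≠ a := fun e => hne b (by simp [ht]) e.symm
        simp [hba]
    · have h1 : pvStep (a :: t) p = p :: a :: t := by simp [pvStep, hap]
      rw [h1]
      simp [pvStep]

theorem pvCancelOnce_none_iff (L : List (Int × Int)) :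
    pvCancelOnce L = none ↔ L.IsChain (· ≠ ·) := by
  induction L with
  | nil => simp [pvCancelOnce]
  | cons a t ih =>
    cases t with
    | nil => simp [pvCancelOnce]
    | cons b t' =>
      by_cases hab : a = b
      · simp [pvCancelOnce, hab]
      · rw [pvCancelOnce, if_neg hab, Option.map_eq_none_iff, ih]
        constructor
        · intro h2
          refine List.isChain_cons.mpr ⟨?_, h2⟩
          intro y hy
          simp at hy
          subst hy
          exact hab
        · intro h2
          exact (List.isChain_cons.mp h2).2

theorem pvFoldl_cancelOnce {L L' : List (Int × Int)} (h : pvCancelOnce L = some L')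
    {s : List (Int × Int)} (hs : s.IsChain (· ≠ ·)) :
    L'.foldl pvStep s = L.foldl pvStep s := by
  induction L generalizing L' s with
  | nil => simp [pvCancelOnce] at h
  | cons a t ih =>
    match t, h with
    | b :: t', h =>
      by_cases hab : a = b
      · simp [pvCancelOnce, hab] at h
        subst h; subst hab
        simp only [List.foldl_cons]
        rw [pvStep_step hs]
      · simp [pvCancelOnce, hab] at h
        obtain ⟨M, hM, rfl⟩ := h
        simp only [List.foldl_cons]
        exact ih (by simpa [pvCancelOnce] using hM) (pvStep_chain hs a)

theorem pvReduce_foldl (L : List (Int × Int)) :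
    (pvReduce L).foldl pvStep [] = L.foldl pvStep [] := by
  induction L using pvReduce.induct with
  | case1 L L' h ih =>
    rw [pvReduce, h, ih, pvFoldl_cancelOnce h (by simp)]
  | case2 L h =>
    rw [pvReduce, h]

theorem pvReduce_chain (L : List (Int × Int)) : (pvReduce L).IsChain (· ≠ ·) := by
  induction L using pvReduce.induct with
  | case1 L L' h ih => rw [pvReduce, h]; exact ih
  | case2 L h => rw [pvReduce, h]; exact (pvCancelOnce_none_iff L).mp h

theorem pvFoldl_reduced {L : List (Int × Int)} (hL : L.IsChain (· ≠ ·))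
    {s : List (Int × Int)} (hs : s.IsChain (· ≠ ·))
    (hc : ∀ a b, s.head? = some a → L.head? = some b → a ≠ b) :
    L.foldl pvStep s = L.reverse ++ s := by
  induction L generalizing s with
  | nil => simp
  | cons p t ih =>
    have hstep : pvStep s p = p :: s := by
      unfold pvStep
      cases hh : s.head? with
      | none => simp
      | some a =>
        have hne : a ≠ p := hc a p hh (by simp)
        simp [hne]
    rw [List.foldl_cons, hstep]
    have hs' : (p :: s).IsChain (· ≠ ·) := by
      refine List.isChain_cons.mpr ⟨?_, hs⟩
      intro y hy
      exact Ne.symm (hc y p hy (by simp))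
    rw [ih (List.isChain_cons.mp hL).2 hs' ?_]
    · simp
    · intro a b ha hb
      simp at ha
      subst ha
      exact (List.isChain_cons.mp hL).1 b hb

-- A's end-append step is the reverse of pvStep (under Pre_, both indices are in range)
theorem pvStepA_rev (color radius : List Int) (k : Nat)
    (hk : k < color.length) (hk' : k < radius.length)
    (t : List (Int × Int)) :
    pvStepA color radius t.reverse (k : Int) = (pvStep t (color[k], radius[k])).reverse := by
  unfold pvStepA
  simp only [PySem.List.pyGet?_natCast, List.getElem?_eq_getElem hk, List.getElem?_eq_getElem hk']
  rw [PySem.List.pyGet?_neg_one]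
  cases t with
  | nil => simp [pvStep]
  | cons a t' =>
    by_cases hap : a = (color[k], radius[k])
    · subst hap
      simp [pvStep, List.getLast?_reverse]
    · simp [pvStep, List.getLast?_reverse, hap, Ne.symm]

theorem pvBridge (color radius : List Int) (hpre : color.length ≤ radius.length) :
    ∀ k : Nat, k ≤ color.length →
      (PySem.List.pyRange 0 (k : Int) 1).foldl (pvStepA color radius) []
        = (((color.zip radius).take k).foldl pvStep []).reverse := by
  intro k
  induction k with
  | zero => intro _; simp
  | succ k ih =>
    intro hk
    have hk1 : k < color.length := by omega
    have hk2 : k < radius.length := by omega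
    have hkz : k < (color.zip radius).length := by simp [List.length_zip]; omega
    have hsplit : (PySem.List.pyRange 0 ((k : Int) + 1) 1)
        = PySem.List.pyRange 0 (k : Int) 1 ++ [(k : Int)] :=
      PySem.List.pyRange_one_succ_right (by positivity)
    push_cast
    rw [hsplit, List.foldl_append]
    rw [ih (by omega)]
    simp only [List.foldl_cons, List.foldl_nil]
    rw [pvStepA_rev color radius k hk1 hk2]
    rw [← List.take_concat_get' _ _ hkz]
    simp [List.getElem_zip]

-- ===== VERDICT (by name: the statement is the Claim_ definition above) =====
theorem finLength_spec : Claim_equal_finLength := by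
  intro N color radius _ hpre
  unfold Spec_finLength finLength finLength_alt
  have hb := pvBridge color radius hpre color.length (le_refl _)
  have htake : (color.zip radius).take color.length = color.zip radius := by
    apply List.take_of_length_le
    simp [List.length_zip]
  rw [htake] at hb
  simp only
  rw [hb]
  have h1 : ((color.zip radius).foldl pvStep []).length
      = (pvReduce (color.zip radius)).length := by
    rw [← pvReduce_foldl]
    rw [pvFoldl_reduced (pvReduce_chain _) (by simp) (by simp)]
    simp
  simp [h1]
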